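-- pv_equiv track=rewrite | github.com/nitpicker55555/shapefile2rdf | flask_pro/ask_functions_agent.py | limit_total_words
-- ===== SOURCE A (Python) =====
-- def limit_total_words(lst, max_length=10000):
--     total_length = 0
--     result = []
--
--     for item in lst:
--         current_length = len(item)
--         if total_length + current_length > max_length:
--             break
--         result.append(item)
--         total_length += current_length
--
--     return result
-- ===== SOURCE B (Python) =====
-- def limit_total_words(lst, max_length=10000):
--     # Build the running prefix-length sums, count how many fit (sums are
--     # nondecreasing since lengths are >= 0), and slice the list once.
--     sums = []
--     total = 0
--     for item in lst:
--         total += len(item)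
--         sums.append(total)
--     count = sum(1 for s in sums if s <= max_length)
--     return lst[:count]
-- ===== Notes on version B (the rewrite author's own statement) =====
-- stated objective: alternative
-- what changed: Replaces the accumulate-and-append loop with an early break by a prefix-sum list, a count of the sums that fit (valid because lengths are non-negative so the sums are monotone), and one slice of the input.
import Mathlib
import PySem

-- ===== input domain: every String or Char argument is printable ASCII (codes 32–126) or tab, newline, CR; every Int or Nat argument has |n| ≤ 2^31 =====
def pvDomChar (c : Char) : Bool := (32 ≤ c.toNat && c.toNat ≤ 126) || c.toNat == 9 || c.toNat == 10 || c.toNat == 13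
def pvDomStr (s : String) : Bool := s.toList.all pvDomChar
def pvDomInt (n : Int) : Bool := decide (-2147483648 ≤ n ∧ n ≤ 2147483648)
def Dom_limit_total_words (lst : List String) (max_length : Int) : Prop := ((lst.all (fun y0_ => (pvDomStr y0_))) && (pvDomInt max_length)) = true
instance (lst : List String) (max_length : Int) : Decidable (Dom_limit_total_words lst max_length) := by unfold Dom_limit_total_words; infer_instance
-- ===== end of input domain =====

-- B replaces A's accumulate-and-append loop (early break) by a prefix-sum list,
-- a count of the sums that fit, and one slice (objective: alternative).

-- ===== PORT A =====
-- the for-loop with `break`, carrying total_length and result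
def pvLoopA (max_length : Int) : List String → Int → List String → List String
  | [], _, result => result
  | item :: rest, total_length, result =>
    let current_length : Int := (PySem.Str.len item : Int)
    if total_length + current_length > max_length then result
    else pvLoopA max_length rest (total_length + current_length) (result ++ [item])

def limit_total_words (lst : List String) (max_length : Int) : List String :=
  pvLoopA max_length lst 0 []

-- ===== PORT B =====
-- the prefix sums of the item lengths (Source B's `sums` loop)
def pvSums : List String → Int → List Int
  | [], _ => []
  | item :: rest, total =>
    let total' := total + (PySem.Str.len item : Int)
    total' :: pvSums rest total'

def limit_total_words_alt (lst : List String) (max_length : Int) : List String :=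
  let sums := pvSums lst 0
  let count := sums.countP (fun s => decide (s ≤ max_length))
  lst.take count

-- ===== PRECONDITION & SPEC =====
def Spec_limit_total_words (lst : List String) (max_length : Int) (out : List String) : Prop := out = limit_total_words_alt lst max_length
instance (lst : List String) (max_length : Int) (out : List String) : Decidable (Spec_limit_total_words lst max_length out) := by unfold Spec_limit_total_words; infer_instance

-- ===== CLAIM (what is proved, stated in full; the proofs are below) =====
def Claim_equal_limit_total_words : Prop := ∀ (lst : List String) (max_length : Int), Dom_limit_total_words lst max_length → Spec_limit_total_words lst max_length (limit_total_words lst max_length)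

-- ===== LEMMAS AND PROOFS =====

-- every prefix sum starting from t is at least t (lengths are non-negative)
theorem pvSums_mem_ge (xs : List String) (t : Int) :
    ∀ s ∈ pvSums xs t, t ≤ s := by
  induction xs generalizing t with
  | nil => simp [pvSums]
  | cons x xs ih =>
    intro s hs
    simp only [pvSums, List.mem_cons] at hs
    have hx : (0 : Int) ≤ (PySem.Str.len x : Int) := Int.natCast_nonneg _
    rcases hs with h | h
    · omega
    · have := ih (t + (PySem.Str.len x : Int)) s h
      omega

theorem pvLoopA_eq (m : Int) (xs : List String) :
    ∀ (t : Int) (res : List String),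
      pvLoopA m xs t res
        = res ++ xs.take ((pvSums xs t).countP (fun s => decide (s ≤ m))) := by
  induction xs with
  | nil => intro t res; simp [pvLoopA, pvSums]
  | cons x xs ih =>
    intro t res
    simp only [pvLoopA, pvSums]
    by_cases h : t + (PySem.Str.len x : Int) > m
    · rw [if_pos h]
      have hz : ((t + (PySem.Str.len x : Int)) :: pvSums xs (t + (PySem.Str.len x : Int))).countP
          (fun s => decide (s ≤ m)) = 0 := by
        rw [List.countP_eq_zero]
        intro s hs
        simp only [List.mem_cons] at hs
        rcases hs with rfl | hs
        · simp only [decide_eq_true_eq]; omega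
        · have := pvSums_mem_ge xs (t + (PySem.Str.len x : Int)) s hs
          simp only [decide_eq_true_eq]; omega
      rw [hz, List.take_zero, List.append_nil]
    · rw [if_neg h]
      rw [ih (t + (PySem.Str.len x : Int)) (res ++ [x])]
      have hle : ((fun s => decide (s ≤ m)) (t + (PySem.Str.len x : Int))) = true :=
        decide_eq_true (by omega)
      rw [List.countP_cons, if_pos hle, List.take_succ_cons]
      simp

-- ===== VERDICT (by name: the statement is the Claim_ definition above) =====
theorem limit_total_words_spec : Claim_equal_limit_total_words := by
  intro lst max_length _
  unfold Spec_limit_total_words limit_total_words limit_total_words_alt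
  simpa using pvLoopA_eq max_length lst 0 []
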